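-- pv_equiv track=rewrite | github.com/lehoangh/qa-system | get_operator.py | operator_mapper
-- ===== SOURCE A (Python) =====
-- def operator_mapper(operator):
--     mappings = {
--         'max': ["highest", "majority", "a lot of", "best", "most", "a lot of",
--                 "prefer", "max", 'mostly', 'the most'],
--         'min': ["lowest", "least", 'min', 'the least', 'do least', 'minority'],
--         'second': ["second most"],
--         '>': ['more than', 'rather than', 'further than', 'increase',
--               'or more', 'longer than', 'at least', 'more'],
--         '<': ['less than', 'within', 'no more than', 'before', 'under',
--               'or less', 'at most', 'less'],
--         'all': ['all', 'the various', 'the different']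
--     }
--
--     for key in mappings:
--         if operator in mappings[key]:
--             return key
-- ===== SOURCE B (Python) =====
-- # Idiomatic re-implementation: one precomputed inverted phrase -> symbol dictionary,
-- # then a single dict lookup (no loop over categories, no list scans).
-- _PHRASE_TO_SYMBOL = {
--     "highest": "max", "majority": "max", "a lot of": "max", "best": "max",
--     "most": "max", "prefer": "max", "max": "max", "mostly": "max", "the most": "max",
--     "lowest": "min", "least": "min", "min": "min", "the least": "min",
--     "do least": "min", "minority": "min",
--     "second most": "second",
--     "more than": ">", "rather than": ">", "further than": ">", "increase": ">",
--     "or more": ">", "longer than": ">", "at least": ">", "more": ">",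
--     "less than": "<", "within": "<", "no more than": "<", "before": "<",
--     "under": "<", "or less": "<", "at most": "<", "less": "<",
--     "all": "all", "the various": "all", "the different": "all",
-- }
--
-- def operator_mapper(operator):
--     return _PHRASE_TO_SYMBOL.get(operator)
-- ===== Notes on version B (the rewrite author's own statement) =====
-- stated objective: idiomatic
-- what changed: Replaced the loop over categories with inner list-membership scans by a single precomputed inverted phrase-to-symbol dictionary and one dict lookup.
import Mathlib
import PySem

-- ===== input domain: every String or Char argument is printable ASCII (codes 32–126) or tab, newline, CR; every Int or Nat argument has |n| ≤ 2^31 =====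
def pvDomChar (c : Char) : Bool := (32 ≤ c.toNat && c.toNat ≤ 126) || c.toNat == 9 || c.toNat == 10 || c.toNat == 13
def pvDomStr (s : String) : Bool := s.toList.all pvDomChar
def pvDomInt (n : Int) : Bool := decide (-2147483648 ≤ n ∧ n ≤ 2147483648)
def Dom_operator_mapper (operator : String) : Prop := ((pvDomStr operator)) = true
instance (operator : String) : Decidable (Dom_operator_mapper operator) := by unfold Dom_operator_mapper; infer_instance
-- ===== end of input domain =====

-- B replaces A's loop over categories (with an inner list-membership scan each) by one
-- precomputed inverted phrase→symbol dictionary and a single lookup (idiomatic).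

-- ===== PORT A =====
-- the dict literal `mappings`, as an insertion-ordered association list category ↦ phrase list
def pvMappingsA : List (String × List String) :=
  [("max", ["highest", "majority", "a lot of", "best", "most", "a lot of",
            "prefer", "max", "mostly", "the most"]),
   ("min", ["lowest", "least", "min", "the least", "do least", "minority"]),
   ("second", ["second most"]),
   (">", ["more than", "rather than", "further than", "increase",
          "or more", "longer than", "at least", "more"]),
   ("<", ["less than", "within", "no more than", "before", "under",
          "or less", "at most", "less"]),
   ("all", ["all", "the various", "the different"])]

-- the `for key in mappings: if operator in mappings[key]: return key` loop
def pvScanA (cats : List (String × List String)) (operator : String) : Option String :=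
  match cats with
  | [] => none
  | (key, phrases) :: rest =>
      if phrases.contains operator then some key else pvScanA rest operator

def operator_mapper (operator : String) : Option String :=
  pvScanA pvMappingsA operator

-- ===== PORT B =====
-- the precomputed inverted dict _PHRASE_TO_SYMBOL of Source B
def pvTableB : PySem.Dict String String := PySem.Dict.mk
  [("highest", "max"), ("majority", "max"), ("a lot of", "max"), ("best", "max"),
   ("most", "max"), ("prefer", "max"), ("max", "max"), ("mostly", "max"), ("the most", "max"),
   ("lowest", "min"), ("least", "min"), ("min", "min"), ("the least", "min"),
   ("do least", "min"), ("minority", "min"),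
   ("second most", "second"),
   ("more than", ">"), ("rather than", ">"), ("further than", ">"), ("increase", ">"),
   ("or more", ">"), ("longer than", ">"), ("at least", ">"), ("more", ">"),
   ("less than", "<"), ("within", "<"), ("no more than", "<"), ("before", "<"),
   ("under", "<"), ("or less", "<"), ("at most", "<"), ("less", "<"),
   ("all", "all"), ("the various", "all"), ("the different", "all")]

def operator_mapper_alt (operator : String) : Option String :=
  pvTableB.get? operator

-- ===== PRECONDITION & SPEC =====
def Spec_operator_mapper (operator : String) (out : Option String) : Prop := out = operator_mapper_alt operator
instance (operator : String) (out : Option String) : Decidable (Spec_operator_mapper operator out) := by unfold Spec_operator_mapper; infer_instance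

-- ===== CLAIM (what is proved, stated in full; the proofs are below) =====
def Claim_equal_operator_mapper : Prop := ∀ (operator : String), Dom_operator_mapper operator → Spec_operator_mapper operator (operator_mapper operator)

-- ===== LEMMAS AND PROOFS =====

-- one category of A's scan equals a block of phrase↦key entries at the head of an assoc-list lookup
theorem pvScan_block (op key : String) (ps : List String) (rest : List (String × String)) :
    (if ps.contains op then some key
     else (PySem.Dict.mk rest).get? op)
    = (PySem.Dict.mk (ps.map (fun p => (p, key)) ++ rest)).get? op := by
  induction ps with
  | nil => simp
  | cons p ps ih =>
      rw [List.contains_cons, List.map_cons, List.cons_append, PySem.Dict.get?_mk_cons]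
      by_cases h : op = p
      · subst h; simp
      · have h1 : (op == p) = false := beq_eq_false_iff_ne.mpr h
        have h2 : (p == op) = false := beq_eq_false_iff_ne.mpr (Ne.symm h)
        rw [h1, Bool.false_or, h2]
        simpa using ih

-- dropping the duplicated ("a lot of", "max") entry (shadowed by the earlier one) keeps every lookup
theorem pvDedup (op : String) (post : List (String × String)) :
    (PySem.Dict.mk ([("highest", "max"), ("majority", "max"), ("a lot of", "max"),
        ("best", "max"), ("most", "max"), ("a lot of", "max")] ++ post)).get? op
    = (PySem.Dict.mk ([("highest", "max"), ("majority", "max"), ("a lot of", "max"),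
        ("best", "max"), ("most", "max")] ++ post)).get? op := by
  by_cases h : "a lot of" = op
  · subst h; simp [PySem.Dict.get?_mk_cons]
  · have hb : ("a lot of" == op) = false := by simp [h]
    simp [PySem.Dict.get?_mk_cons, hb]

-- ===== VERDICT (by name: the statement is the Claim_ definition above) =====
theorem operator_mapper_spec : Claim_equal_operator_mapper := by
  intro op _
  show operator_mapper op = operator_mapper_alt op
  unfold operator_mapper operator_mapper_alt pvMappingsA pvTableB
  simp only [pvScanA]
  rw [show (none : Option String) = (PySem.Dict.mk ([] : List (String × String))).get? op from rfl,
    pvScan_block, pvScan_block, pvScan_block, pvScan_block, pvScan_block, pvScan_block]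
  simp only [List.map_cons, List.map_nil, List.cons_append, List.nil_append, List.append_nil]
  exact pvDedup op _
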